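-- pv_equiv track=rewrite | github.com/agenitrini/BDDgen | Utils.py | count_profiles
-- ===== SOURCE A (Python) =====
-- def count_profiles(size, k):
--     """
--     size is the size of the BDD
--     k  is the index of the root (number of variables)
--     """
--     n = size - 2 # size of the spine
--     L = k+1 #
--     if n > 1 and k == 1:
--         return {}
--     E = {2:1}
--     for i in range(1,k-1):
--         F ={}
--         for S in E:
--             m0 = S*(S-1)
--             m1 = 2**(k-i)
--             m2 = ((n - S + 1) // 2) + 1
--             M = min(m0, m1, m2)+1
--             for l in range(M):
--                 C = S+l
--                 if C in F:
--                     F[C]=F[C]+E[S]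
--                 else:
--                     F[C] = E[S]
--         E = F
--     if L > 2:
--         F = {}
--         for S in E:
--             l = n-S+1
--             if l <= 2 and l >=0:
--                 C = S+l+1
--                 if C in F:
--                     F[C]=F[C]+E[S]
--                 else:
--                     F[C] = E[S]
--         E = F
--     return E
-- ===== SOURCE B (Python) =====
-- def count_profiles(size, k):
--     # B: per-level difference-array (range-add via diff dict + one prefix-sum scan)
--     # over a contiguous block of profile keys, instead of A's inner loop that
--     # re-adds E[S] to every key of each range one by one.
--     n = size - 2
--     if n > 1 and k == 1:
--         return {}
--     counts = [1]  # counts[j] = number of profiles with key 2 + j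
--     for i in range(1, k - 1):
--         if not counts:
--             break
--         m1 = 2 ** (k - i)
--         ends = []  # ends[j] = j + M(j), for the prefix of j's with M(j) >= 1
--         for j in range(len(counts)):
--             S = 2 + j
--             M = min(S * (S - 1), m1, (n - S + 1) // 2 + 1) + 1
--             if M <= 0:
--                 break
--             ends.append(j + M)
--         top = 0
--         for e in ends:
--             top = max(top, e)
--         diff = {}
--         for j, e in enumerate(ends):
--             v = counts[j]
--             diff[j] = diff.get(j, 0) + v
--             diff[e] = diff.get(e, 0) - v
--         new = []
--         acc = 0
--         for c in range(top):
--             acc += diff.get(c, 0)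
--             new.append(acc)
--         counts = new
--     if k > 1:
--         sel = [v for j, v in enumerate(counts) if 0 <= n - 1 - j <= 2]
--         return {size: sum(sel)} if sel else {}
--     return {2 + j: v for j, v in enumerate(counts)}
-- ===== Notes on version B (the rewrite author's own statement) =====
-- stated objective: faster
-- what changed: Each DP level's inner loop (adding E[S] to every key in a contiguous range, one key at a time) is replaced by a difference-array range-add plus one prefix-sum scan over a contiguous block of counts, and the final level is collapsed to a single filtered sum since every surviving state maps to the one key `size`.
import Mathlib
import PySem

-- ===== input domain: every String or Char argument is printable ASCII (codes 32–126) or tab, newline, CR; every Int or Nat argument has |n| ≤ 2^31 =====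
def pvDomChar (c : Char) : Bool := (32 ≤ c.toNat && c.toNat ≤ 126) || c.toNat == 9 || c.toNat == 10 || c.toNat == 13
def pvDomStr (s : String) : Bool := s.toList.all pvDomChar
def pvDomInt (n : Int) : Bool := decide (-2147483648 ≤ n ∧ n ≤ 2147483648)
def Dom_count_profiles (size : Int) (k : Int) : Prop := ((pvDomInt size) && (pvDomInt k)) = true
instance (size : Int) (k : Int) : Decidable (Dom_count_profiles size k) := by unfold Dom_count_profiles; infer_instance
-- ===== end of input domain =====

-- B replaces A's per-key inner accumulation loop by a difference-array range-add with one
-- prefix-sum scan per DP level (objective: faster; a timing run measures the speed-up).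

-- ===== PORT A =====
-- one iteration of A's outer `for i in range(1, k-1)` loop (A's loop body, verbatim)
def stepA (n k i : Int) (E : PySem.Dict Int Int) : PySem.Dict Int Int :=
  E.keys.foldl (fun F S =>
    let m0 := S * (S - 1)
    -- 2**(k-i): exact, since every i produced by range(1, k-1) has k - i ≥ 2
    let m1 := (2 : Int) ^ (k - i).toNat
    let m2 := PySem.Int.floordiv (n - S + 1) 2 + 1
    let M := min (min m0 m1) m2 + 1
    (PySem.List.pyRange 0 M 1).foldl (fun F l =>
      let C := S + l
      -- E[S] is an exact lookup: S is a key of E, so getD never takes the default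
      if F.contains C then F.insert C (F.getD C 0 + E.getD S 0)
      else F.insert C (E.getD S 0)) F) PySem.Dict.empty

-- A's final `if L > 2` loop body, verbatim
def lastA (n : Int) (E : PySem.Dict Int Int) : PySem.Dict Int Int :=
  E.keys.foldl (fun F S =>
    let l := n - S + 1
    if l ≤ 2 ∧ l ≥ 0 then
      let C := S + l + 1
      if F.contains C then F.insert C (F.getD C 0 + E.getD S 0)
      else F.insert C (E.getD S 0)
    else F) PySem.Dict.empty

def count_profiles (size : Int) (k : Int) : List (Int × Int) :=
  let n := size - 2
  let L := k + 1
  if n > 1 ∧ k = 1 then []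
  else
    let E1 := (PySem.List.pyRange 1 (k - 1) 1).foldl (fun E i => stepA n k i E)
      (PySem.Dict.ofList [(2, 1)])
    let E2 := if L > 2 then lastA n E1 else E1
    E2.items

-- ===== PORT B =====
-- Source B's `for j in range(len(counts)): ... if M <= 0: break; ends.append(j + M)` loop
def mkEnds (n m1 : Int) (len : Nat) (j : Nat) : List Int :=
  if _h : j < len then
    let S : Int := 2 + (j : Int)
    let M := min (min (S * (S - 1)) m1) (PySem.Int.floordiv (n - S + 1) 2 + 1) + 1
    if M ≤ 0 then []
    else ((j : Int) + M) :: mkEnds n m1 len (j + 1)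
  else []
termination_by len - j

-- one iteration of Source B's outer loop: difference array + prefix-sum scan
def stepB (n k i : Int) (counts : List Int) : List Int :=
  -- Source B's `if not counts: break`: once counts is empty every later level keeps it empty,
  -- so the break is modelled as skipping the remaining loop bodies
  if counts = [] then counts else
  let m1 := (2 : Int) ^ (k - i).toNat   -- 2**(k-i): exact, k - i ≥ 2 inside the loop
  let ends := mkEnds n m1 counts.length 0
  let top := ends.foldl (fun t e => max t e) 0
  let diff := (PySem.List.enumerate ends 0).foldl (fun d je =>
    -- counts[j] is an exact index: j < len(ends) ≤ len(counts)
    let v := PySem.List.pyGetD counts je.1 0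
    (d.modify je.1 0 (· + v)).modify je.2 0 (· - v))
    (PySem.Dict.empty : PySem.Dict Int Int)
  let fin := (PySem.List.pyRange 0 top 1).foldl (fun (p : List Int × Int) c =>
    let acc := p.2 + diff.getD c 0
    (p.1 ++ [acc], acc)) ([], 0)
  fin.1

def count_profiles_alt (size : Int) (k : Int) : List (Int × Int) :=
  let n := size - 2
  if n > 1 ∧ k = 1 then []
  else
    let counts := (PySem.List.pyRange 1 (k - 1) 1).foldl (fun cs i => stepB n k i cs) [(1 : Int)]
    if k > 1 then
      let sel := (PySem.List.enumerate counts 0).foldl (fun acc jv =>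
        if 0 ≤ n - 1 - jv.1 ∧ n - 1 - jv.1 ≤ 2 then acc ++ [jv.2] else acc) []
      if sel = [] then [] else [(size, sel.sum)]
    else
      (PySem.List.enumerate counts 0).map (fun jv => (2 + jv.1, jv.2))

-- ===== PRECONDITION & SPEC =====
def Spec_count_profiles (size : Int) (k : Int) (out : List (Int × Int)) : Prop := out = count_profiles_alt size k
instance (size : Int) (k : Int) (out : List (Int × Int)) : Decidable (Spec_count_profiles size k out) := by unfold Spec_count_profiles; infer_instance

-- ===== CLAIM (what is proved, stated in full; the proofs are below) =====
def Claim_equal_count_profiles : Prop := ∀ (size : Int) (k : Int), Dom_count_profiles size k → Spec_count_profiles size k (count_profiles size k)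

-- ===== LEMMAS AND PROOFS =====


-- proof-side abbreviations ------------------------------------------------

-- the per-state range width of one DP level (A's `M`, Source B's `M`)
def Mf (n m1 S : Int) : Int :=
  min (min (S * (S - 1)) m1) (PySem.Int.floordiv (n - S + 1) 2 + 1) + 1

def mN (n m1 : Int) (j : Nat) : Nat := (Mf n m1 (2 + (j : Int))).toNat
def eN (n m1 : Int) (j : Nat) : Nat := j + mN n m1 j
def tof (n : Int) (len : Nat) : Nat := min len (n + 2).toNat

def specT (n m1 : Int) (len : Nat) : Nat :=
  ((List.range (tof n len)).map (eN n m1)).foldl max 0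

def specW (n m1 : Int) (cs : List Int) (c : Nat) : Int :=
  ((List.range (tof n cs.length)).map
    (fun j => if j ≤ c ∧ c < eN n m1 j then cs.getD j 0 else 0)).sum

-- the canonical dict of a contiguous block of counts starting at key 2
def cdict (cs : List Int) : PySem.Dict Int Int :=
  PySem.Dict.mk ((List.range cs.length).map (fun (j : Nat) => ((2 : Int) + (j : Int), cs.getD j 0)))

-- A's inner `for l in range(M)` loop, with S and E[S] abstracted
def bodyA (n m1 v S : Int) (F : PySem.Dict Int Int) : PySem.Dict Int Int :=
  (PySem.List.pyRange 0 (Mf n m1 S) 1).foldl (fun F l =>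
    if F.contains (S + l) then F.insert (S + l) (F.getD (S + l) 0 + v)
    else F.insert (S + l) v) F

def Tpart (n m1 : Int) (len q : Nat) : Nat :=
  ((List.range (min q (tof n len))).map (eN n m1)).foldl max 0

def Wpart (n m1 : Int) (cs : List Int) (q c : Nat) : Int :=
  ((List.range (min q (tof n cs.length))).map
    (fun j => if j ≤ c ∧ c < eN n m1 j then cs.getD j 0 else 0)).sum

-- arithmetic facts about Mf ------------------------------------------------

theorem floordiv_two (x : Int) : PySem.Int.floordiv x 2 = x / 2 := by
  show Int.fdiv _ _ = _
  rw [Int.fdiv_eq_ediv]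
  simp

theorem Mf_pos_iff (n m1 : Int) (hm1 : 1 ≤ m1) (j : Nat) :
    1 ≤ Mf n m1 (2 + (j : Int)) ↔ (j : Int) < n + 2 := by
  unfold Mf
  rw [floordiv_two]
  have hj : (0 : Int) ≤ (j : Int) := Int.natCast_nonneg j
  have ha : 0 ≤ (2 + (j : Int)) * ((2 + (j : Int)) - 1) := by nlinarith
  generalize (2 + (j : Int)) * ((2 + (j : Int)) - 1) = a at ha
  simp only [min_def]
  split_ifs <;> omega

theorem Mf_toNat (n m1 : Int) (hm1 : 1 ≤ m1) (j : Nat) (h : (j : Int) < n + 2) :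
    Mf n m1 (2 + (j : Int)) = ((mN n m1 j : Nat) : Int) := by
  have h1 : 1 ≤ Mf n m1 (2 + (j : Int)) := (Mf_pos_iff n m1 hm1 j).mpr h
  unfold mN
  omega

theorem lt_eN (n m1 : Int) (hm1 : 1 ≤ m1) (j : Nat) (h : (j : Int) < n + 2) :
    j < eN n m1 j := by
  have h1 : 1 ≤ Mf n m1 (2 + (j : Int)) := (Mf_pos_iff n m1 hm1 j).mpr h
  unfold eN mN
  omega

-- small list facts ---------------------------------------------------------

theorem foldl_max_le (l : List Nat) (a : Nat) :
    a ≤ l.foldl max a ∧ ∀ x ∈ l, x ≤ l.foldl max a := by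
  induction l generalizing a with
  | nil => simp
  | cons y l ih =>
    simp only [List.foldl_cons]
    rcases ih (max a y) with ⟨h1, h2⟩
    constructor
    · exact le_trans (le_max_left a y) h1
    · intro x hx
      rcases List.mem_cons.mp hx with h | h
      · subst h
        exact le_trans (le_max_right a x) h1
      · exact h2 x h

theorem foldl_max_cast (l : List Nat) (a : Nat) :
    (l.map (fun (x : Nat) => (x : Int))).foldl (fun t e => max t e) (a : Int)
      = ((l.foldl max a : Nat) : Int) := by
  induction l generalizing a with
  | nil => simp
  | cons y l ih =>
    rw [List.map_cons, List.foldl_cons, List.foldl_cons, ← Nat.cast_max, ih]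

theorem sum_ind (m x : Nat) (v : Int) :
    ((List.range m).map (fun (c : Nat) => if (x : Int) = (c : Int) then v else 0)).sum
      = if x < m then v else 0 := by
  induction m with
  | zero => simp
  | succ m ih =>
    rw [List.range_succ, List.map_append, List.sum_append, ih]
    by_cases h : x = m
    · subst h
      simp
    · have : ¬ ((x : Int) = (m : Int)) := by omega
      simp only [List.map_cons, List.map_nil, this, if_false, List.sum_cons, List.sum_nil]
      have hiff : x < m + 1 ↔ x < m := by omega
      rw [if_congr hiff rfl rfl]
      ring

theorem enum_eq (cs : List Int) :
    PySem.List.enumerate cs 0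
      = (List.range cs.length).map (fun (j : Nat) => ((j : Int), cs.getD j 0)) := by
  rw [PySem.List.enumerate_eq_map_pyRange cs 0, PySem.List.len_eq, PySem.List.pyRange_zero_nat,
    List.map_map]
  refine List.map_congr_left (fun j hj => ?_)
  simp only [Function.comp]
  rw [PySem.List.pyGetD_natCast]

-- cdict facts ---------------------------------------------------------------

theorem cdict_items (cs : List Int) :
    (cdict cs).items = (List.range cs.length).map (fun (j : Nat) => ((2 : Int) + (j : Int), cs.getD j 0)) := rfl

theorem cdict_keys (cs : List Int) :
    (cdict cs).keys = (List.range cs.length).map (fun (j : Nat) => (2 : Int) + (j : Int)) := by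
  simp only [PySem.Dict.keys, cdict, List.map_map]
  rfl

theorem keys_nodup_of_items_range (F : PySem.Dict Int Int) (T : Nat) (g : Nat → Int)
    (hF : F.items = (List.range T).map (fun (c : Nat) => ((2 : Int) + (c : Int), g c))) :
    F.keys.Nodup := by
  have : F.keys = (List.range T).map (fun (c : Nat) => (2 : Int) + (c : Int)) := by
    simp only [PySem.Dict.keys, hF, List.map_map]
    rfl
  rw [this]
  exact List.Nodup.map (fun a b h => by omega) (List.nodup_range)

theorem cdict_getD (cs : List Int) (j : Nat) (h : j < cs.length) :
    (cdict cs).getD (2 + (j : Int)) 0 = cs.getD j 0 := by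
  refine PySem.Dict.getD_of_mem_items _ ?_ (keys_nodup_of_items_range _ _ _ (cdict_items cs)) 0
  rw [cdict_items]
  exact List.mem_map.mpr ⟨j, List.mem_range.mpr h, rfl⟩

-- ===== A side ==============================================================

theorem stepA_eq_bodyA (n k i : Int) (E : PySem.Dict Int Int) :
    stepA n k i E
      = E.keys.foldl (fun F S => bodyA n ((2 : Int) ^ (k - i).toNat) (E.getD S 0) S F)
          PySem.Dict.empty := rfl

theorem innerA (v : Int) (q T M : Nat) (hqT : q ≤ T) (g : Nat → Int) (F : PySem.Dict Int Int)
    (hF : F.items = (List.range T).map (fun (c : Nat) => ((2 : Int) + (c : Int), g c))) :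
    ((PySem.List.pyRange 0 ((M : Nat) : Int) 1).foldl (fun F l =>
        if F.contains ((2 + (q : Int)) + l) then
          F.insert ((2 + (q : Int)) + l) (F.getD ((2 + (q : Int)) + l) 0 + v)
        else F.insert ((2 + (q : Int)) + l) v) F).items
      = (List.range (max T (q + M))).map (fun (c : Nat) => ((2 : Int) + (c : Int),
          if q ≤ c ∧ c < q + M then (if c < T then g c else 0) + v else g c)) := by
  induction M with
  | zero =>
    rw [show ((0 : Nat) : Int) = 0 from rfl, PySem.List.pyRange_one_eq_nil le_rfl,
      List.foldl_nil, hF]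
    have hmax : max T (q + 0) = T := by omega
    rw [hmax]
    refine List.map_congr_left (fun c hc => ?_)
    have hno : ¬ (q ≤ c ∧ c < q + 0) := by omega
    rw [if_neg hno]
  | succ M ih =>
    have hcast : ((M + 1 : Nat) : Int) = ((M : Nat) : Int) + 1 := by push_cast; ring
    rw [hcast, PySem.List.pyRange_one_succ_right (by positivity), List.foldl_append,
      List.foldl_cons, List.foldl_nil]
    have hkey : (2 + (q : Int)) + (M : Int) = 2 + ((q + M : Nat) : Int) := by push_cast; ring
    rw [hkey]
    have hkeys : (List.foldl (fun F l =>
        if F.contains ((2 + (q : Int)) + l) = true then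
          F.insert ((2 + (q : Int)) + l) (F.getD ((2 + (q : Int)) + l) 0 + v)
        else F.insert ((2 + (q : Int)) + l) v) F (PySem.List.pyRange 0 ((M : Nat) : Int) 1)).keys
        = (List.range (max T (q + M))).map (fun (c : Nat) => (2 : Int) + (c : Int)) := by
      simp only [PySem.Dict.keys, ih, List.map_map]
      rfl
    have hnodup := keys_nodup_of_items_range _ _ _ ih
    have hcont : (List.foldl (fun F l =>
        if F.contains ((2 + (q : Int)) + l) = true then
          F.insert ((2 + (q : Int)) + l) (F.getD ((2 + (q : Int)) + l) 0 + v)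
        else F.insert ((2 + (q : Int)) + l) v) F (PySem.List.pyRange 0 ((M : Nat) : Int) 1)).contains
          (2 + ((q + M : Nat) : Int))
        = decide (q + M < max T (q + M)) := by
      rw [PySem.Dict.contains_eq_decide_mem_keys, hkeys]
      by_cases hlt : q + M < max T (q + M)
      · simp only [hlt, decide_true, decide_eq_true_eq]
        exact List.mem_map.mpr ⟨q + M, List.mem_range.mpr hlt, rfl⟩
      · simp only [hlt, decide_false, decide_eq_false_iff_not]
        intro hmem
        rcases List.mem_map.mp hmem with ⟨c, hc, hceq⟩
        have hcr := List.mem_range.mp hc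
        exact absurd (show q + M < max T (q + M) by omega) hlt
    by_cases hTM : q + M < T
    · have hmaxM : max T (q + M) = T := by omega
      have hmaxM1 : max T (q + (M + 1)) = T := by omega
      rw [hcont]
      have hdec : decide (q + M < max T (q + M)) = true := by
        simp only [decide_eq_true_eq]
        omega
      rw [hdec, if_pos rfl]
      have hgd : (List.foldl (fun F l =>
          if F.contains ((2 + (q : Int)) + l) = true then
            F.insert ((2 + (q : Int)) + l) (F.getD ((2 + (q : Int)) + l) 0 + v)
          else F.insert ((2 + (q : Int)) + l) v) F (PySem.List.pyRange 0 ((M : Nat) : Int) 1)).getD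
            (2 + ((q + M : Nat) : Int)) 0
          = g (q + M) := by
        have hmem : ((2 : Int) + ((q + M : Nat) : Int),
            if q ≤ q + M ∧ q + M < q + M then (if q + M < T then g (q + M) else 0) + v
            else g (q + M)) ∈ (List.foldl (fun F l =>
          if F.contains ((2 + (q : Int)) + l) = true then
            F.insert ((2 + (q : Int)) + l) (F.getD ((2 + (q : Int)) + l) 0 + v)
          else F.insert ((2 + (q : Int)) + l) v) F (PySem.List.pyRange 0 ((M : Nat) : Int) 1)).items := by
          rw [ih]
          exact List.mem_map.mpr ⟨q + M, List.mem_range.mpr (by omega), rfl⟩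
        have := PySem.Dict.getD_of_mem_items _ hmem (keys_nodup_of_items_range _ _ _ ih) 0
        rw [this]
        have hno : ¬ (q ≤ q + M ∧ q + M < q + M) := by omega
        rw [if_neg hno]
      rw [hgd, PySem.Dict.items_insert_of_contains _ _ (by rw [hcont, hdec]), ih]
      rw [List.map_map, hmaxM, hmaxM1]
      refine List.map_congr_left (fun c hc => ?_)
      have hcT : c < T := List.mem_range.mp hc
      simp only [Function.comp_def]
      by_cases hceq : c = q + M
      · rw [hceq, if_pos (by simp), if_pos (show q ≤ q + M ∧ q + M < q + (M + 1) by omega),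
          if_pos hTM]
      · have hbeq : ((2 : Int) + (c : Int) == 2 + ((q + M : Nat) : Int)) = false := by
          simp only [beq_eq_false_iff_ne, ne_eq]
          intro hh
          apply hceq
          omega
        rw [if_neg (by simp only [beq_iff_eq]; omega)]
        by_cases h2 : q ≤ c ∧ c < q + M
        · rw [if_pos h2, if_pos (show q ≤ c ∧ c < q + (M + 1) from by omega), if_pos hcT]
        · rw [if_neg h2, if_neg (show ¬ (q ≤ c ∧ c < q + (M + 1)) from by omega)]
    · have hmaxM : max T (q + M) = q + M := by omega
      have hmaxM1 : max T (q + (M + 1)) = q + (M + 1) := by omega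
      rw [hcont]
      have hdec : decide (q + M < max T (q + M)) = false := by
        simp only [decide_eq_false_iff_not]
        omega
      rw [hdec, if_neg (by simp)]
      rw [PySem.Dict.items_insert_of_not_contains _ _ (by rw [hcont, hdec]), ih]
      rw [hmaxM, hmaxM1, show q + (M + 1) = (q + M) + 1 from by omega, List.range_succ,
        List.map_append]
      congr 1
      · refine List.map_congr_left (fun c hc => ?_)
        have hcM : c < q + M := List.mem_range.mp hc
        by_cases h2 : q ≤ c ∧ c < q + M
        · rw [if_pos h2, if_pos (show q ≤ c ∧ c < q + M + 1 from by omega)]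
        · rw [if_neg h2, if_neg (show ¬ (q ≤ c ∧ c < q + M + 1) from by omega)]
      · simp only [List.map_cons, List.map_nil]
        rw [if_pos (by omega), if_neg (by omega)]
        norm_num

theorem bodyA_nil (n m1 v S : Int) (F : PySem.Dict Int Int) (hM : Mf n m1 S ≤ 0) :
    bodyA n m1 v S F = F := by
  unfold bodyA
  rw [PySem.List.pyRange_one_eq_nil hM, List.foldl_nil]

theorem bodyA_items (n m1 v : Int) (q T : Nat) (hqT : q ≤ T) (hm1 : 1 ≤ m1)
    (hq2 : (q : Int) < n + 2) (g : Nat → Int) (F : PySem.Dict Int Int)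
    (hF : F.items = (List.range T).map (fun (c : Nat) => ((2 : Int) + (c : Int), g c))) :
    (bodyA n m1 v (2 + (q : Int)) F).items
      = (List.range (max T (q + mN n m1 q))).map (fun (c : Nat) => ((2 : Int) + (c : Int),
          if q ≤ c ∧ c < q + mN n m1 q then (if c < T then g c else 0) + v else g c)) := by
  unfold bodyA
  rw [Mf_toNat n m1 hm1 q hq2]
  exact innerA v q T (mN n m1 q) hqT g F hF

theorem Tpart_ge (n m1 : Int) (hm1 : 1 ≤ m1) (len q : Nat) (hq : q ≤ tof n len) :
    q ≤ Tpart n m1 len q := by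
  cases q with
  | zero => exact Nat.zero_le _
  | succ p =>
    have hmin : min (p + 1) (tof n len) = p + 1 := by omega
    have hp2 : (p : Int) < n + 2 := by
      have : p + 1 ≤ (n + 2).toNat := le_trans hq (by unfold tof; omega)
      omega
    have hmN : 1 ≤ mN n m1 p := by
      have := (Mf_pos_iff n m1 hm1 p).mpr hp2
      unfold mN
      omega
    have hmem : eN n m1 p ∈ (List.range (min (p + 1) (tof n len))).map (eN n m1) := by
      rw [hmin]
      exact List.mem_map.mpr ⟨p, List.mem_range.mpr (by omega), rfl⟩
    have hle := (foldl_max_le ((List.range (min (p + 1) (tof n len))).map (eN n m1)) 0).2 _ hmem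
    have h2 : p + 1 ≤ eN n m1 p := by unfold eN; omega
    exact le_trans h2 hle

theorem Wpart_zero (n m1 : Int) (cs : List Int) (q c : Nat)
    (hc : Tpart n m1 cs.length q ≤ c) : Wpart n m1 cs q c = 0 := by
  unfold Wpart
  apply List.sum_eq_zero
  intro x hx
  rcases List.mem_map.mp hx with ⟨j, hj, hxeq⟩
  have hmem : eN n m1 j ∈ (List.range (min q (tof n cs.length))).map (eN n m1) :=
    List.mem_map.mpr ⟨j, hj, rfl⟩
  have hle := (foldl_max_le ((List.range (min q (tof n cs.length))).map (eN n m1)) 0).2 _ hmem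
  unfold Tpart at hc
  rw [← hxeq, if_neg (by omega)]

theorem outerA (n m1 : Int) (hm1 : 1 ≤ m1) (cs : List Int) (q : Nat) (hq : q ≤ cs.length) :
    ((List.range q).foldl (fun F j => bodyA n m1 (cs.getD j 0) (2 + (j : Int)) F)
        PySem.Dict.empty).items
      = (List.range (Tpart n m1 cs.length q)).map
          (fun (c : Nat) => ((2 : Int) + (c : Int), Wpart n m1 cs q c)) := by
  induction q with
  | zero =>
    simp [Tpart, Wpart, PySem.Dict.empty]
  | succ q ih =>
    rw [List.range_succ, List.foldl_append, List.foldl_cons, List.foldl_nil]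
    by_cases hq2 : (q : Int) < n + 2
    · -- active state: the inner loop adds cs[q] on the range [q, eN q)
      have hqt : q < tof n cs.length := by unfold tof; omega
      have hminq : min q (tof n cs.length) = q := by omega
      have hminq1 : min (q + 1) (tof n cs.length) = q + 1 := by omega
      have hqT : q ≤ Tpart n m1 cs.length q := Tpart_ge n m1 hm1 cs.length q (by omega)
      rw [bodyA_items n m1 (cs.getD q 0) q (Tpart n m1 cs.length q) hqT hm1 hq2
        (Wpart n m1 cs q) _ (ih (by omega))]
      have hT1 : Tpart n m1 cs.length (q + 1)
          = max (Tpart n m1 cs.length q) (q + mN n m1 q) := by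
        unfold Tpart
        rw [hminq, hminq1, List.range_succ, List.map_append, List.foldl_append]
        rfl
      rw [← hT1]
      refine List.map_congr_left (fun c hc => ?_)
      have hW1 : Wpart n m1 cs (q + 1) c
          = Wpart n m1 cs q c + (if q ≤ c ∧ c < eN n m1 q then cs.getD q 0 else 0) := by
        unfold Wpart
        rw [hminq, hminq1, List.range_succ, List.map_append, List.sum_append]
        simp
      rw [hW1]
      by_cases h2 : q ≤ c ∧ c < q + mN n m1 q
      · rw [if_pos h2, if_pos (show q ≤ c ∧ c < eN n m1 q from h2)]
        by_cases h3 : c < Tpart n m1 cs.length q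
        · rw [if_pos h3]
        · rw [if_neg h3, Wpart_zero n m1 cs q c (by omega)]
      · rw [if_neg h2, if_neg (show ¬ (q ≤ c ∧ c < eN n m1 q) from h2)]
        ring_nf
    · -- dead state: M ≤ 0, the inner loop body runs zero times
      have hM : Mf n m1 (2 + (q : Int)) ≤ 0 := by
        have h0 : ¬ 1 ≤ Mf n m1 (2 + (q : Int)) := fun h1 => hq2 ((Mf_pos_iff n m1 hm1 q).mp h1)
        omega
      have hmin : min (q + 1) (tof n cs.length) = min q (tof n cs.length) := by
        unfold tof
        omega
      rw [bodyA_nil n m1 _ _ _ hM, ih (by omega)]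
      unfold Tpart Wpart
      rw [hmin]

theorem stepA_items (n k i : Int) (cs : List Int) :
    (stepA n k i (cdict cs)).items
      = (List.range (specT n ((2 : Int) ^ (k - i).toNat) cs.length)).map
          (fun (c : Nat) => ((2 : Int) + (c : Int), specW n ((2 : Int) ^ (k - i).toNat) cs c)) := by
  have hm1 : (1 : Int) ≤ 2 ^ (k - i).toNat := one_le_pow₀ (by norm_num)
  rw [stepA_eq_bodyA, cdict_keys, List.foldl_map]
  have hcong : List.foldl (fun x (y : Nat) => bodyA n ((2 : Int) ^ (k - i).toNat)
        ((cdict cs).getD (2 + (y : Int)) 0) (2 + (y : Int)) x) PySem.Dict.empty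
        (List.range cs.length)
      = List.foldl (fun x (y : Nat) => bodyA n ((2 : Int) ^ (k - i).toNat)
        (cs.getD y 0) (2 + (y : Int)) x) PySem.Dict.empty (List.range cs.length) :=
    by
      apply PySem.List.foldl_congr_mem
      intro acc j hj
      rw [cdict_getD cs j (List.mem_range.mp hj)]
  rw [hcong, outerA n ((2 : Int) ^ (k - i).toNat) hm1 cs cs.length le_rfl]
  have hmin : min cs.length (tof n cs.length) = tof n cs.length := by unfold tof; omega
  unfold Tpart Wpart specT specW
  rw [hmin]

-- ===== B side ==============================================================

theorem mkEnds_eq (n m1 : Int) (hm1 : 1 ≤ m1) (len j : Nat) :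
    mkEnds n m1 len j
      = (List.range' j (tof n len - j)).map (fun (x : Nat) => ((eN n m1 x : Nat) : Int)) := by
  have key : ∀ (d : Nat) (j : Nat), len - j ≤ d → mkEnds n m1 len j
      = (List.range' j (tof n len - j)).map (fun (x : Nat) => ((eN n m1 x : Nat) : Int)) := by
    intro d
    induction d with
    | zero =>
      intro j hj
      rw [mkEnds]
      have hlen : ¬ j < len := by omega
      have ht : tof n len - j = 0 := by unfold tof; omega
      rw [ht]
      simp [hlen]
    | succ d ih =>
      intro j hj
      rw [mkEnds]
      by_cases hlen : j < len
      · simp only [hlen, dif_pos]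
        have hMf : (min (min ((2 + (j : Int)) * ((2 + (j : Int)) - 1)) m1)
            (PySem.Int.floordiv (n - (2 + (j : Int)) + 1) 2 + 1) + 1) = Mf n m1 (2 + (j : Int)) := rfl
        by_cases hM : Mf n m1 (2 + (j : Int)) ≤ 0
        · have hj2 : ¬ ((j : Int) < n + 2) := fun hc => by
            have := (Mf_pos_iff n m1 hm1 j).mpr hc
            omega
          have ht : tof n len - j = 0 := by unfold tof; omega
          rw [ht]
          simp only [hMf, hM, if_pos, List.range'_zero, List.map_nil]

        · have hj2 : (j : Int) < n + 2 := by
            by_contra hc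
            have h0 : ¬ 1 ≤ Mf n m1 (2 + (j : Int)) := fun h1 => hc ((Mf_pos_iff n m1 hm1 j).mp h1)
            omega
          have htj : j < tof n len := by unfold tof; omega
          have hstep : tof n len - j = (tof n len - (j + 1)) + 1 := by omega
          rw [hstep, List.range'_succ, List.map_cons]
          simp only [hMf, hM, if_false]
          rw [ih (j + 1) (by omega)]
          congr 1
          rw [Mf_toNat n m1 hm1 j hj2]
          unfold eN
          push_cast
          ring
      · have ht : tof n len - j = 0 := by unfold tof; omega
        rw [ht]
        simp [hlen]
  exact key (len - j) j le_rfl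

theorem diff_fold (l : List (Int × Int)) (vf : Int → Int) (d : PySem.Dict Int Int) (c : Int) :
    (l.foldl (fun d je =>
        (d.modify je.1 0 (· + vf je.1)).modify je.2 0 (· - vf je.1)) d).getD c 0
      = d.getD c 0 + (l.map (fun je =>
          (if je.1 = c then vf je.1 else 0) - (if je.2 = c then vf je.1 else 0))).sum := by
  induction l generalizing d with
  | nil => simp
  | cons p l ih =>
    rw [List.foldl_cons, ih, List.map_cons, List.sum_cons]
    have h1 : ((d.modify p.1 0 (· + vf p.1)).modify p.2 0 (· - vf p.1)).getD c 0
        = d.getD c 0 + ((if p.1 = c then vf p.1 else 0) - (if p.2 = c then vf p.1 else 0)) := by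
      simp only [PySem.Dict.getD_modify]
      by_cases h2 : c = p.2 <;> by_cases h3 : c = p.1 <;> by_cases h4 : p.1 = p.2
      all_goals try simp_all
      all_goals try ring
      all_goals first
        | (rw [if_neg (Ne.symm h4)]; ring)
        | (rw [if_neg (Ne.symm h3), if_neg (Ne.symm h2)]; ring)
    rw [h1]
    ring

theorem diff_fold' (cs : List Int) (l : List (Int × Int)) (d : PySem.Dict Int Int) (c : Int) :
    (l.foldl (fun d je =>
        (d.modify je.1 0 (· + PySem.List.pyGetD cs je.1 0)).modify je.2 0
          (· - PySem.List.pyGetD cs je.1 0)) d).getD c 0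
      = d.getD c 0 + (l.map (fun je =>
          (if je.1 = c then PySem.List.pyGetD cs je.1 0 else 0)
            - (if je.2 = c then PySem.List.pyGetD cs je.1 0 else 0))).sum :=
  diff_fold l (fun a => PySem.List.pyGetD cs a 0) d c

theorem scan_spec (D : Int → Int) (T : Nat) (l0 : List Int) (a0 : Int) :
    (PySem.List.pyRange 0 ((T : Nat) : Int) 1).foldl
        (fun (p : List Int × Int) c => (p.1 ++ [p.2 + D c], p.2 + D c)) (l0, a0)
      = (l0 ++ (List.range T).map
            (fun (c : Nat) => a0 + ((List.range (c + 1)).map (fun (x : Nat) => D (x : Int))).sum),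
         a0 + ((List.range T).map (fun (x : Nat) => D (x : Int))).sum) := by
  induction T with
  | zero => simp [PySem.List.pyRange_one_eq_nil]
  | succ T ih =>
    have hc : ((T + 1 : Nat) : Int) = ((T : Nat) : Int) + 1 := by push_cast; ring
    rw [hc, PySem.List.pyRange_one_succ_right (by positivity), List.foldl_append, ih,
      List.foldl_cons, List.foldl_nil]
    rw [List.range_succ, List.map_append, List.map_append, List.sum_append]
    refine Prod.ext ?_ ?_
    · show _ ++ _ ++ _ = _ ++ (_ ++ _)
      rw [List.append_assoc]
      congr 2
      simp only [List.map_cons, List.map_nil]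
      have hx : a0 + ((List.range T).map (fun (x : Nat) => D (x : Int))).sum + D ((T : Nat) : Int)
          = a0 + ((List.range (T + 1)).map (fun (x : Nat) => D (x : Int))).sum := by
        rw [List.range_succ, List.map_append, List.sum_append]
        simp
        ring
      rw [hx]
    · show _ + _ + _ = _ + _
      simp
      ring

theorem foldl_max_cast0 (l : List Nat) :
    (l.map (fun (x : Nat) => (x : Int))).foldl (fun t e => max t e) 0
      = ((l.foldl max 0 : Nat) : Int) := by
  simpa using foldl_max_cast l 0

theorem sum_map_sub {α : Type} (l : List α) (f g : α → Int) :
    (l.map (fun x => f x - g x)).sum = (l.map f).sum - (l.map g).sum := by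
  induction l with
  | nil => simp
  | cons x l ih =>
    simp only [List.map_cons, List.sum_cons, ih]
    ring

theorem sum_swap (t : Nat) (v : Nat → Int) (e : Nat → Nat) (he : ∀ j < t, j < e j) (c : Nat) :
    ((List.range (c + 1)).map (fun (x : Nat) =>
        ((List.range t).map (fun (j : Nat) =>
          (if (j : Int) = (x : Int) then v j else 0)
            - (if ((e j : Nat) : Int) = (x : Int) then v j else 0))).sum)).sum
      = ((List.range t).map (fun j => if j ≤ c ∧ c < e j then v j else 0)).sum := by
  revert he
  induction t with
  | zero => intro _; simp
  | succ t ih =>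
    intro he
    have he' : ∀ j < t, j < e j := fun j hj => he j (by omega)
    have hlt : t < e t := he t (by omega)
    have hrs : List.range (t + 1) = List.range t ++ [t] := List.range_succ
    simp only [hrs, List.map_append, List.sum_append, List.map_cons, List.map_nil,
      List.sum_cons, List.sum_nil, add_zero]
    rw [PySem.List.sum_map_add_int, ih he', sum_map_sub, sum_ind, sum_ind]
    congr 1
    by_cases h1 : t ≤ c
    · by_cases h2 : c < e t
      · rw [if_pos (by omega), if_neg (by omega), if_pos ⟨h1, h2⟩]
        ring
      · rw [if_pos (by omega), if_pos (by omega), if_neg (fun hh => h2 hh.2)]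
        ring
    · rw [if_neg (by omega), if_neg (by omega), if_neg (fun hh => h1 hh.1)]
      ring

theorem stepB_eq (n k i : Int) (cs : List Int) :
    stepB n k i cs
      = (List.range (specT n ((2 : Int) ^ (k - i).toNat) cs.length)).map
          (fun c => specW n ((2 : Int) ^ (k - i).toNat) cs c) := by
  have hm1 : (1 : Int) ≤ 2 ^ (k - i).toNat := one_le_pow₀ (by norm_num)
  generalize hgen : (2 : Int) ^ (k - i).toNat = m1 at *
  by_cases hcs : cs = []
  · subst hcs
    simp [stepB, specT, tof]
  simp only [stepB, hgen]
  rw [if_neg hcs]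
  -- the list of interval ends
  have hends : mkEnds n m1 cs.length 0
      = ((List.range (tof n cs.length)).map (eN n m1)).map (fun (x : Nat) => (x : Int)) := by
    rw [mkEnds_eq n m1 hm1 cs.length 0, Nat.sub_zero, ← List.range_eq_range', List.map_map]
    rfl
  rw [hends]
  -- top = specT, as an Int
  rw [foldl_max_cast0]
  rw [scan_spec]
  dsimp only
  rw [List.nil_append]
  unfold specT
  have henum : PySem.List.enumerate
      (List.map (fun (x : Nat) => (x : Int)) (List.map (eN n m1) (List.range (tof n cs.length)))) 0
      = (List.range (tof n cs.length)).map (fun (j : Nat) => ((j : Int), ((eN n m1 j : Nat) : Int))) := by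
    rw [List.map_map, enum_eq, List.length_map, List.length_range]
    refine List.map_congr_left (fun j hj => ?_)
    rw [PySem.List.getD_map_range _ _ _ _ (List.mem_range.mp hj)]
    rfl
  simp only [henum]
  simp only [diff_fold', PySem.Dict.getD_empty, zero_add, List.map_map, Function.comp_def,
    PySem.List.pyGetD_natCast]
  refine List.map_congr_left (fun c hc => ?_)
  rw [sum_swap (tof n cs.length) (fun j => cs.getD j 0) (eN n m1)
    (fun j hj => lt_eN n m1 hm1 j (by unfold tof at hj; omega)) c]
  rfl

-- ===== combining ===========================================================

theorem step_eq (n k i : Int) (cs : List Int) :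
    stepA n k i (cdict cs) = cdict (stepB n k i cs) := by
  by_cases hcs : cs = []
  · subst hcs
    apply PySem.Dict.ext
    rw [show stepB n k i [] = [] from rfl]
    rfl
  rw [show stepB n k i cs = (if cs = [] then cs else stepB n k i cs) from by rw [if_neg hcs]]
  rw [if_neg hcs]
  apply PySem.Dict.ext
  rw [stepA_items, cdict_items, stepB_eq]
  rw [List.length_map, List.length_range]
  refine List.map_congr_left (fun c hc => ?_)
  rw [PySem.List.getD_map_range _ _ _ _ (List.mem_range.mp hc)]

theorem fold_eq (n k : Int) (l : List Int) (cs : List Int) :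
    l.foldl (fun E i => stepA n k i E) (cdict cs)
      = cdict (l.foldl (fun cs i => stepB n k i cs) cs) := by
  induction l generalizing cs with
  | nil => rfl
  | cons i l ih => simpa [step_eq] using ih (stepB n k i cs)

-- A's final-loop body, with S and E[S] abstracted
def bodyL (n v S : Int) (F : PySem.Dict Int Int) : PySem.Dict Int Int :=
  if n - S + 1 ≤ 2 ∧ n - S + 1 ≥ 0 then
    (if F.contains (S + (n - S + 1) + 1) = true then
      F.insert (S + (n - S + 1) + 1) (F.getD (S + (n - S + 1) + 1) 0 + v)
    else F.insert (S + (n - S + 1) + 1) v)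
  else F

theorem lastA_eq_bodyL (n : Int) (E : PySem.Dict Int Int) :
    lastA n E = E.keys.foldl (fun F S => bodyL n (E.getD S 0) S F) PySem.Dict.empty := rfl

theorem outerL (n : Int) (cs : List Int) (q : Nat) :
    ((List.range q).foldl (fun F (j : Nat) => bodyL n (cs.getD j 0) (2 + (j : Int)) F)
        PySem.Dict.empty)
      = (if ((List.range q).filter
              (fun (j : Nat) => decide (0 ≤ n - 1 - (j : Int) ∧ n - 1 - (j : Int) ≤ 2))) = [] then
          PySem.Dict.mk []
        else PySem.Dict.mk [(n + 2,
          (((List.range q).filter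
              (fun (j : Nat) => decide (0 ≤ n - 1 - (j : Int) ∧ n - 1 - (j : Int) ≤ 2))).map
            (fun j => cs.getD j 0)).sum)]) := by
  induction q with
  | zero =>
    simp
    rfl
  | succ q ih =>
    rw [List.range_succ, List.foldl_append, List.foldl_cons, List.foldl_nil, ih,
      List.filter_append]
    by_cases hP : (0 ≤ n - 1 - (q : Int) ∧ n - 1 - (q : Int) ≤ 2)
    · have hfq : (List.filter (fun (j : Nat) => decide (0 ≤ n - 1 - (j : Int) ∧ n - 1 - (j : Int) ≤ 2))
          [q]) = [q] := by
        simp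
        omega
      rw [hfq]
      have hcond : n - (2 + (q : Int)) + 1 ≤ 2 ∧ n - (2 + (q : Int)) + 1 ≥ 0 := by omega
      have hkey : (2 + (q : Int)) + (n - (2 + (q : Int)) + 1) + 1 = n + 2 := by ring
      unfold bodyL
      rw [if_pos hcond, hkey]
      by_cases hsel : (List.filter (fun (j : Nat) => decide (0 ≤ n - 1 - (j : Int) ∧ n - 1 - (j : Int) ≤ 2))
          (List.range q)) = []
      · rw [if_pos hsel, hsel]
        have hns : ¬ ([] ++ [q] : List Nat) = [] := by simp
        rw [if_neg hns]
        have hcontains : (PySem.Dict.mk ([] : List (Int × Int))).contains (n + 2) = false := rfl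
        rw [hcontains]
        simp only [Bool.false_eq_true, if_false]
        apply PySem.Dict.ext
        rw [PySem.Dict.items_insert_of_not_contains _ _ hcontains]
        simp
      · rw [if_neg hsel]
        have hns : ¬ ((List.filter (fun (j : Nat) => decide (0 ≤ n - 1 - (j : Int) ∧ n - 1 - (j : Int) ≤ 2))
            (List.range q)) ++ [q]) = [] := by simp
        rw [if_neg hns]
        have hcontains : (PySem.Dict.mk [(n + 2,
            (((List.range q).filter
              (fun (j : Nat) => decide (0 ≤ n - 1 - (j : Int) ∧ n - 1 - (j : Int) ≤ 2))).map
              (fun j => cs.getD j 0)).sum)]).contains (n + 2) = true := by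
          simp [PySem.Dict.contains_mk]
        rw [hcontains]
        simp only [if_true]
        apply PySem.Dict.ext
        rw [PySem.Dict.items_insert_of_contains _ _ hcontains]
        have hgd : (PySem.Dict.mk [(n + 2,
            (((List.range q).filter
              (fun (j : Nat) => decide (0 ≤ n - 1 - (j : Int) ∧ n - 1 - (j : Int) ≤ 2))).map
              (fun j => cs.getD j 0)).sum)]).getD (n + 2) 0
            = (((List.range q).filter
              (fun (j : Nat) => decide (0 ≤ n - 1 - (j : Int) ∧ n - 1 - (j : Int) ≤ 2))).map
              (fun j => cs.getD j 0)).sum := by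
          apply PySem.Dict.getD_of_mem_items
          · simp
          · simp [PySem.Dict.keys]
        rw [hgd]
        simp [List.sum_append]
    · have hfq : (List.filter (fun (j : Nat) => decide (0 ≤ n - 1 - (j : Int) ∧ n - 1 - (j : Int) ≤ 2))
          [q]) = [] := by
        simp
        omega
      rw [hfq, List.append_nil]
      unfold bodyL
      rw [if_neg (by omega)]

theorem lastA_eq (n : Int) (cs : List Int) :
    (lastA n (cdict cs)).items
      = (if ((PySem.List.enumerate cs 0).filter
              (fun jv => decide (0 ≤ n - 1 - jv.1 ∧ n - 1 - jv.1 ≤ 2))).map (·.2) = [] then []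
         else [(n + 2,
           (((PySem.List.enumerate cs 0).filter
              (fun jv => decide (0 ≤ n - 1 - jv.1 ∧ n - 1 - jv.1 ≤ 2))).map (·.2)).sum)]) := by
  rw [lastA_eq_bodyL, cdict_keys, List.foldl_map]
  have hcong : List.foldl (fun x (y : Nat) => bodyL n ((cdict cs).getD (2 + (y : Int)) 0)
        (2 + (y : Int)) x) PySem.Dict.empty (List.range cs.length)
      = List.foldl (fun x (y : Nat) => bodyL n (cs.getD y 0) (2 + (y : Int)) x)
        PySem.Dict.empty (List.range cs.length) := by
    apply PySem.List.foldl_congr_mem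
    intro acc j hj
    rw [cdict_getD cs j (List.mem_range.mp hj)]
  rw [hcong, outerL n cs cs.length]
  rw [enum_eq, List.filter_map, List.map_map]
  have hpred : ((fun jv : Int × Int => decide (0 ≤ n - 1 - jv.1 ∧ n - 1 - jv.1 ≤ 2)) ∘
      (fun (j : Nat) => ((j : Int), cs.getD j 0)))
      = fun (j : Nat) => decide (0 ≤ n - 1 - (j : Int) ∧ n - 1 - (j : Int) ≤ 2) := rfl
  rw [hpred]
  have hmap : ((fun p : Int × Int => p.2) ∘ (fun (j : Nat) => ((j : Int), cs.getD j 0)))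
      = fun (j : Nat) => cs.getD j 0 := rfl
  rw [hmap]
  by_cases hsel : (List.filter (fun (j : Nat) => decide (0 ≤ n - 1 - (j : Int) ∧ n - 1 - (j : Int) ≤ 2))
      (List.range cs.length)) = []
  · rw [if_pos hsel, if_pos (by rw [hsel]; rfl)]
  · rw [if_neg hsel, if_neg (fun h => hsel (List.map_eq_nil_iff.mp h))]

-- ===== VERDICT (by name: the statement is the Claim_ definition above) =====
theorem count_profiles_spec : Claim_equal_count_profiles := by
  intro size k _
  unfold Spec_count_profiles
  simp only [count_profiles, count_profiles_alt]
  by_cases hg : size - 2 > 1 ∧ k = 1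
  · rw [if_pos hg, if_pos hg]
  · rw [if_neg hg, if_neg hg]
    have hstart : PySem.Dict.ofList [((2 : Int), (1 : Int))] = cdict [1] := by decide
    rw [hstart, fold_eq (size - 2) k _ [1]]
    by_cases hk : k > 1
    · rw [if_pos (show k + 1 > 2 from by omega), if_pos hk]
      rw [lastA_eq (size - 2)]
      rw [PySem.List.foldl_append_ite
        (p := fun jv : Int × Int => 0 ≤ size - 2 - 1 - jv.1 ∧ size - 2 - 1 - jv.1 ≤ 2)
        (f := fun jv : Int × Int => jv.2)]
      rw [List.nil_append]
      have hkey : size - 2 + 2 = size := by ring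
      rw [hkey]
    · rw [if_neg (show ¬ (k + 1 > 2) from by omega), if_neg hk]
      rw [cdict_items, enum_eq, List.map_map]
      rfl
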